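-- pv_equiv track=rewrite | github.com/gpaOliveira/SuperDiffer | SuperDiffer/id/controllers.py | find_diff_indexes_and_lenght_on_same_size_values
-- ===== SOURCE A (Python) =====
-- def find_diff_indexes_and_lenght_on_same_size_values(value_one, value_two):
--     """Find the diff indexes and lenght of the difference, as follows below, and return on an array of diffs. Some more details follows below:"""
--     """(a) on the first different char in a sequence, save that index on a buffer along with the sequence lenght (only 1 for now)"""
--     """(b) on the successive different chars in a sequence, increment the lenght of the sequence on the buffer"""
--     """(c) on the first equal char after a sequence of differences, add the buffer to our list and reset it if needed"""
--     current_diff = None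
--     diffs = []
--     for char_index in range(len(value_one)):
--         if value_one[char_index] != value_two[char_index]:
--             if not current_diff: ## (a) situation, as above (this comment won't generate docs!)
--                 current_diff = {"diff_start":char_index, "chain":1}
--             else: ## (b) situation, as above (this comment won't generate docs!)
--                 current_diff["chain"] += 1
--         else:
--             if current_diff: ## (c) situation, as above (this comment won't generate docs!)
--                 diffs.append(current_diff)
--                 current_diff = None
--
--     ## Let's not forget to append anything that has remained on the buffer  (this comment won't generate docs!)
--     if current_diff:
--         diffs.append(current_diff)
--         current_diff = None
--
--     return diffs
-- ===== SOURCE B (Python) =====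
-- def find_diff_indexes_and_lenght_on_same_size_values(value_one, value_two):
--     mismatches = [i for i in range(len(value_one)) if value_one[i] != value_two[i]]
--     runs = []
--     for i in mismatches:
--         if runs and runs[-1][0] + runs[-1][1] == i:
--             runs[-1] = (runs[-1][0], runs[-1][1] + 1)
--         else:
--             runs.append((i, 1))
--     return [{"diff_start": s, "chain": c} for (s, c) in runs]
-- ===== Notes on version B (the rewrite author's own statement) =====
-- stated objective: alternative
-- what changed: B first computes the list of mismatching indices with a comprehension, then groups consecutive indices into (start,length) runs in a second pass and converts them to dicts at the end, instead of A's per-character state machine carrying a current-diff dict buffer.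
import Mathlib
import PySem

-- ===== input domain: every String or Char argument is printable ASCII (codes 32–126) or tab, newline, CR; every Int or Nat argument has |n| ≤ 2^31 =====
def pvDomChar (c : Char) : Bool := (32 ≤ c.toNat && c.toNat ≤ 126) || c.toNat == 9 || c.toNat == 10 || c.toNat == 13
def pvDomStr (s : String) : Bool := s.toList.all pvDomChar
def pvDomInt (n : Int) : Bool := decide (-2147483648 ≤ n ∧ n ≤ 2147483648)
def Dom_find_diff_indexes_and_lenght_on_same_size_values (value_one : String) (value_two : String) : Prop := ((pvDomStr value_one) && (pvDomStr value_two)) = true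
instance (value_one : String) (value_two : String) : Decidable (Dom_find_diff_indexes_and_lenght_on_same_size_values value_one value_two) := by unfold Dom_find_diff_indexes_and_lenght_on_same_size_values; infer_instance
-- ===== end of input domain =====

-- B groups the comprehension-computed mismatch indices into runs instead of A's per-char state machine; equal on Pre_ (A raises IndexError when value_two is shorter).

-- ===== PORT A =====
-- current_diff["chain"] += 1 : update of the "chain" key of the assoc-list dict (exact: keys are the two distinct literals)
def pvChainIncr (d : List (String × Int)) : List (String × Int) :=
  d.map (fun kv => if kv.1 == "chain" then (kv.1, kv.2 + 1) else kv)

-- one iteration of A's for-loop (state = (current_diff, diffs)); `if not current_diff` is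
-- `current_diff is None` here since the dict is never empty
def pvAStep (value_one value_two : String)
    (st : Option (List (String × Int)) × List (List (String × Int))) (char_index : Int) :
    Option (List (String × Int)) × List (List (String × Int)) :=
  if PySem.Str.pyGet? value_one char_index ≠ PySem.Str.pyGet? value_two char_index then
    match st.1 with
    | none => (some [("diff_start", char_index), ("chain", (1 : Int))], st.2)
    | some d => (some (pvChainIncr d), st.2)
  else
    match st.1 with
    | some d => (none, st.2 ++ [d])
    | none => (none, st.2)

def find_diff_indexes_and_lenght_on_same_size_values (value_one : String) (value_two : String) : List (List (String × Int)) :=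
  let r := (PySem.List.pyRange 0 (PySem.Str.len value_one) 1).foldl (pvAStep value_one value_two) (none, [])
  match r.1 with
  | some d => r.2 ++ [d]
  | none => r.2

-- ===== PORT B =====
-- one iteration of B's run-grouping loop over the mismatch indices
def pvBStep (runs : List (Int × Int)) (i : Int) : List (Int × Int) :=
  match runs.getLast? with
  | some sc => if sc.1 + sc.2 = i then runs.dropLast ++ [(sc.1, sc.2 + 1)] else runs ++ [(i, 1)]
  | none => runs ++ [(i, 1)]

def find_diff_indexes_and_lenght_on_same_size_values_alt (value_one : String) (value_two : String) : List (List (String × Int)) :=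
  let mismatches := (PySem.List.pyRange 0 (PySem.Str.len value_one) 1).filter
    (fun i => PySem.Str.pyGet? value_one i ≠ PySem.Str.pyGet? value_two i)
  let runs := mismatches.foldl pvBStep []
  runs.map (fun sc => [("diff_start", sc.1), ("chain", sc.2)])

-- ===== PRECONDITION & SPEC =====
-- Pre_ excludes exactly the inputs where value_two is shorter than value_one, on which Python A raises IndexError.
def Pre_find_diff_indexes_and_lenght_on_same_size_values (value_one : String) (value_two : String) : Prop :=
  PySem.Str.len value_one ≤ PySem.Str.len value_two
instance (value_one : String) (value_two : String) : Decidable (Pre_find_diff_indexes_and_lenght_on_same_size_values value_one value_two) := by unfold Pre_find_diff_indexes_and_lenght_on_same_size_values; infer_instance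

def pvWitness_find_diff_indexes_and_lenght_on_same_size_values : String × String := ("abcd", "axcy")

def Spec_find_diff_indexes_and_lenght_on_same_size_values (value_one : String) (value_two : String) (out : List (List (String × Int))) : Prop := out = find_diff_indexes_and_lenght_on_same_size_values_alt value_one value_two
instance (value_one : String) (value_two : String) (out : List (List (String × Int))) : Decidable (Spec_find_diff_indexes_and_lenght_on_same_size_values value_one value_two out) := by unfold Spec_find_diff_indexes_and_lenght_on_same_size_values; infer_instance

-- ===== CLAIM (what is proved, stated in full; the proofs are below) =====
def Claim_equal_find_diff_indexes_and_lenght_on_same_size_values : Prop := ∀ (value_one : String) (value_two : String), Dom_find_diff_indexes_and_lenght_on_same_size_values value_one value_two → Pre_find_diff_indexes_and_lenght_on_same_size_values value_one value_two → Spec_find_diff_indexes_and_lenght_on_same_size_values value_one value_two (find_diff_indexes_and_lenght_on_same_size_values value_one value_two)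

-- ===== LEMMAS AND PROOFS =====

def pvToDict (sc : Int × Int) : List (String × Int) := [("diff_start", sc.1), ("chain", sc.2)]

-- the loop invariant relating A's state and B's run list after the first n indices
def pvRel (aSt : Option (List (String × Int)) × List (List (String × Int)))
    (runs : List (Int × Int)) (n : Int) : Prop :=
  match aSt.1 with
  | none => aSt.2 = runs.map pvToDict ∧ ∀ sc, runs.getLast? = some sc → sc.1 + sc.2 < n
  | some d => ∃ s c rs, runs = rs ++ [(s, c)] ∧ aSt.2 = rs.map pvToDict ∧ d = pvToDict (s, c) ∧ s + c = n

theorem pvChainIncr_toDict (s c : Int) : pvChainIncr (pvToDict (s, c)) = pvToDict (s, c + 1) := by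
  simp [pvChainIncr, pvToDict]

theorem pv_inv (value_one value_two : String) (n : Nat) :
    pvRel ((PySem.List.pyRange 0 (n : Int) 1).foldl (pvAStep value_one value_two) (none, []))
      ((PySem.List.pyRange 0 (n : Int) 1).foldl
        (fun runs i => if PySem.Str.pyGet? value_one i ≠ PySem.Str.pyGet? value_two i then pvBStep runs i else runs) [])
      (n : Int) := by
  induction n with
  | zero =>
    simp [PySem.List.pyRange_one_eq_nil (by omega : (0:Int) ≤ 0), pvRel]
  | succ n ih =>
    have hsplit : PySem.List.pyRange 0 ((n : Int) + 1) 1 = PySem.List.pyRange 0 (n : Int) 1 ++ [(n : Int)] :=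
      PySem.List.pyRange_one_succ_right (by positivity)
    push_cast
    rw [hsplit, List.foldl_append, List.foldl_append]
    set A := (PySem.List.pyRange 0 (n : Int) 1).foldl (pvAStep value_one value_two) (none, []) with hA
    set R := (PySem.List.pyRange 0 (n : Int) 1).foldl
        (fun runs i => if PySem.Str.pyGet? value_one i ≠ PySem.Str.pyGet? value_two i then pvBStep runs i else runs) [] with hR
    simp only [List.foldl_cons, List.foldl_nil]
    by_cases hd : PySem.Str.pyGet? value_one (n : Int) ≠ PySem.Str.pyGet? value_two (n : Int)
    · rw [if_pos hd]
      obtain ⟨cur, diffs⟩ := A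
      cases cur with
      | none =>
        obtain ⟨heq, hlast⟩ := ih
        simp only [pvAStep, if_pos hd]
        cases hRl : R.getLast? with
        | none =>
          have hRe : R = [] := List.getLast?_eq_none_iff.mp hRl
          rw [hRe] at heq ⊢
          simp only [pvBStep, List.getLast?_nil]
          refine ⟨n, 1, [], by simp, by simpa using heq, rfl, by ring⟩
        | some sc =>
          have hlt := hlast sc hRl
          simp only [pvBStep, hRl, if_neg (by omega : ¬ sc.1 + sc.2 = (n : Int))]
          exact ⟨n, 1, R, rfl, heq, rfl, by ring⟩
      | some d =>
        obtain ⟨s, c, rs, hrs, hdiffs, hdev, hsc⟩ := ih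
        simp only [pvAStep, if_pos hd]
        have hRl : R.getLast? = some (s, c) := by rw [hrs]; simp
        have hB : pvBStep R (n : Int) = rs ++ [(s, c + 1)] := by
          rw [hrs]
          simp only [pvBStep, List.getLast?_concat, List.dropLast_concat]
          rw [if_pos (by simpa using hsc)]
        rw [hB]
        exact ⟨s, c + 1, rs, rfl, hdiffs, by rw [hdev, pvChainIncr_toDict], by omega⟩
    · rw [if_neg hd]
      obtain ⟨cur, diffs⟩ := A
      cases cur with
      | none =>
        obtain ⟨heq, hlast⟩ := ih
        simp only [pvAStep, if_neg hd]
        exact ⟨heq, fun sc h => by have := hlast sc h; omega⟩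
      | some d =>
        obtain ⟨s, c, rs, hrs, hdiffs, hdev, hsc⟩ := ih
        simp only [pvAStep, if_neg hd]
        simp only [] at hdiffs
        refine ⟨?_, ?_⟩
        · rw [hrs, hdiffs, hdev, List.map_append]; rfl
        · intro sc h
          rw [hrs, List.getLast?_concat] at h
          obtain rfl : (s, c) = sc := by injection h
          omega

-- ===== VERDICT (by name: the statement is the Claim_ definition above) =====
theorem find_diff_indexes_and_lenght_on_same_size_values_spec : Claim_equal_find_diff_indexes_and_lenght_on_same_size_values := by
  intro v1 v2 _ _
  unfold Spec_find_diff_indexes_and_lenght_on_same_size_values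
  unfold find_diff_indexes_and_lenght_on_same_size_values find_diff_indexes_and_lenght_on_same_size_values_alt
  dsimp only
  rw [← PySem.List.foldl_ite_eq_foldl_filter (fun i => PySem.Str.pyGet? v1 i ≠ PySem.Str.pyGet? v2 i) pvBStep]
  have hlen : PySem.Str.len v1 = ((v1.toList.length : Nat) : Int) := by
    simp [PySem.Str.len_eq]
  have h := pv_inv v1 v2 v1.toList.length
  rw [hlen]
  set A := (PySem.List.pyRange 0 ((v1.toList.length : Nat) : Int) 1).foldl (pvAStep v1 v2) (none, []) with hA
  set R := (PySem.List.pyRange 0 ((v1.toList.length : Nat) : Int) 1).foldl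
      (fun runs i => if PySem.Str.pyGet? v1 i ≠ PySem.Str.pyGet? v2 i then pvBStep runs i else runs) [] with hR
  obtain ⟨cur, diffs⟩ := A
  cases cur with
  | none =>
    obtain ⟨heq, _⟩ := h
    simpa [pvToDict] using heq
  | some d =>
    obtain ⟨s, c, rs, hrs, hdiffs, hdev, _⟩ := h
    simp only [] at hdiffs
    simp only [hrs, hdiffs, hdev, List.map_append]
    simp [pvToDict]
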